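-- pv_equiv track=rewrite | github.com/pravesh-k/python-practice-problems | flight_return.py | auto_pilot
-- ===== SOURCE A (Python) =====
-- def auto_pilot(str):
--
--     # storing the directions in a list
--     dir = []
--     for i in range(len(str)):
--         dir.append(str[i])
--
--     # counting the number of times the plane travelled to North and East directions
--     # and comparing it to their counter direction respectively
--     if dir.count('N') == dir.count('S') and dir.count('E') == dir.count('W'):
--         return 'Returned Successfully'
--
--     else:
--         return 'Not Returned Successfully'
-- ===== SOURCE B (Python) =====
-- def auto_pilot(str):
--     # single pass keeping two signed balances instead of building a list and scanning it four times
--     v = 0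
--     h = 0
--     for c in str:
--         if c == 'N':
--             v += 1
--         elif c == 'S':
--             v -= 1
--         elif c == 'E':
--             h += 1
--         elif c == 'W':
--             h -= 1
--     if v == 0 and h == 0:
--         return 'Returned Successfully'
--     return 'Not Returned Successfully'
-- ===== Notes on version B (the rewrite author's own statement) =====
-- stated objective: simpler
-- what changed: Replaces the list-building loop plus four post-hoc .count() scans with one accumulating pass keeping two signed balances (N/S and E/W).
import Mathlib
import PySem

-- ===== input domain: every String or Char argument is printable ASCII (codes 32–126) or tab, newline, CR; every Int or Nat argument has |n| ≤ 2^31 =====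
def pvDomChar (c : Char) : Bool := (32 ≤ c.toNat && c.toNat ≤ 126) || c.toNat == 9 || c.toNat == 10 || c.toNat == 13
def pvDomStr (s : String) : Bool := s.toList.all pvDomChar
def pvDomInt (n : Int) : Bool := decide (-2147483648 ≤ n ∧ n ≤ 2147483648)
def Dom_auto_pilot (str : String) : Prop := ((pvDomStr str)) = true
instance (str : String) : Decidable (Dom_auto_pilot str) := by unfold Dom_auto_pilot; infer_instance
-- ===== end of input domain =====

-- B replaces A's list-building loop and four .count() scans by one accumulating pass with two signed balances (simpler).

-- ===== PORT A =====
-- dir = []; for i in range(len(str)): dir.append(str[i])  — index i is always in range, so pyGetD is exact here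
def auto_pilot (str : String) : String :=
  let dir : List Char :=
    (PySem.List.pyRange 0 (PySem.Str.len str) 1).foldl
      (fun acc i => acc ++ [PySem.List.pyGetD str.toList i ' ']) []
  if dir.count 'N' = dir.count 'S' ∧ dir.count 'E' = dir.count 'W' then
    "Returned Successfully"
  else
    "Not Returned Successfully"

-- ===== PORT B =====
def auto_pilot_alt (str : String) : String :=
  let p :=
    str.toList.foldl
      (fun (p : Int × Int) c =>
        if c = 'N' then (p.1 + 1, p.2)
        else if c = 'S' then (p.1 - 1, p.2)
        else if c = 'E' then (p.1, p.2 + 1)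
        else if c = 'W' then (p.1, p.2 - 1)
        else p)
      (0, 0)
  if p.1 = 0 ∧ p.2 = 0 then "Returned Successfully" else "Not Returned Successfully"

-- ===== PRECONDITION & SPEC =====
def Spec_auto_pilot (str : String) (out : String) : Prop := out = auto_pilot_alt str
instance (str : String) (out : String) : Decidable (Spec_auto_pilot str out) := by unfold Spec_auto_pilot; infer_instance

-- ===== CLAIM (what is proved, stated in full; the proofs are below) =====
def Claim_equal_auto_pilot : Prop := ∀ (str : String), Dom_auto_pilot str → Spec_auto_pilot str (auto_pilot str)

-- ===== LEMMAS AND PROOFS =====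

-- A's building loop reconstructs the character list
theorem auto_pilot_build (l : List Char) :
    (PySem.List.pyRange 0 (l.length : Int) 1).foldl
      (fun acc i => acc ++ [PySem.List.pyGetD l i ' ']) [] = l := by
  rw [PySem.List.foldl_append_singleton_eq_map, List.nil_append,
      PySem.List.pyRange_one, List.map_map]
  apply List.ext_getElem (by simp)
  intro i h1 h2
  simp only [List.getElem_map, List.getElem_range, Function.comp_apply, zero_add,
    PySem.List.pyGetD_natCast]
  exact List.getD_eq_getElem l ' ' h2

-- B's fold computes the two signed count differences
theorem auto_pilot_bal (l : List Char) (a b : Int) :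
    l.foldl
      (fun (p : Int × Int) c =>
        if c = 'N' then (p.1 + 1, p.2)
        else if c = 'S' then (p.1 - 1, p.2)
        else if c = 'E' then (p.1, p.2 + 1)
        else if c = 'W' then (p.1, p.2 - 1)
        else p)
      (a, b)
    = (a + (l.count 'N' : Int) - (l.count 'S' : Int),
       b + (l.count 'E' : Int) - (l.count 'W' : Int)) := by
  induction l generalizing a b with
  | nil => simp
  | cons c cs ih =>
    simp only [List.foldl_cons, List.count_cons]
    by_cases hN : c = 'N'
    · subst hN; rw [if_pos rfl, ih]; simp; omega
    · rw [if_neg hN]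
      by_cases hS : c = 'S'
      · subst hS; rw [if_pos rfl, ih]; simp; omega
      · rw [if_neg hS]
        by_cases hE : c = 'E'
        · subst hE; rw [if_pos rfl, ih]; simp; omega
        · rw [if_neg hE]
          by_cases hW : c = 'W'
          · subst hW; rw [if_pos rfl, ih]; simp; omega
          · rw [if_neg hW, ih]; simp [hN, hS, hE, hW]

-- ===== VERDICT (by name: the statement is the Claim_ definition above) =====
theorem auto_pilot_spec : Claim_equal_auto_pilot := by
  intro s _
  unfold Spec_auto_pilot auto_pilot auto_pilot_alt
  rw [PySem.Str.len_eq, auto_pilot_build s.toList, auto_pilot_bal s.toList 0 0]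
  simp only [zero_add]
  split_ifs with h1 h2 h2 <;> first | rfl | (exfalso; omega)
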